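-- pv_equiv track=rewrite | github.com/DrPuiu/Python | lab2.py | find_obstructed_seats
-- ===== SOURCE A (Python) =====
-- def find_obstructed_seats(matrix):
--     obstructed_seats = []
--     num_rows = len(matrix)
--     num_cols = len(matrix[0])
--
--     for i in range(num_rows):
--         for j in range(num_cols):
--             current_height = matrix[i][j]
--             can_see_game = True
--
--             for row in range(i + 1, num_rows):
--                 if matrix[row][j] > current_height:
--                     can_see_game = False
--                     break
--
--             if not can_see_game:
--                 obstructed_seats.append((i, j))
--
--     return obstructed_seats
-- ===== SOURCE B (Python) =====
-- def find_obstructed_seats(matrix):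
--     num_rows = len(matrix)
--     num_cols = len(matrix[0])
--     # below[i][j] = max height in column j strictly below row i (None if no rows below)
--     below = [None] * num_rows
--     smax = [None] * num_cols
--     for i in range(num_rows - 1, -1, -1):
--         below[i] = smax
--         smax = [x if x is not None and x >= v else v for x, v in zip(smax, matrix[i])]
--     return [(i, j)
--             for i in range(num_rows)
--             for j in range(num_cols)
--             if below[i][j] is not None and below[i][j] > matrix[i][j]]
-- ===== Notes on version B (the rewrite author's own statement) =====
-- stated objective: faster
-- what changed: Replaces the O(R) inner rescan of each column with a single bottom-up pass computing per-column suffix maxima (a 'below' table), so each seat is decided by one comparison.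
import Mathlib
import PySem

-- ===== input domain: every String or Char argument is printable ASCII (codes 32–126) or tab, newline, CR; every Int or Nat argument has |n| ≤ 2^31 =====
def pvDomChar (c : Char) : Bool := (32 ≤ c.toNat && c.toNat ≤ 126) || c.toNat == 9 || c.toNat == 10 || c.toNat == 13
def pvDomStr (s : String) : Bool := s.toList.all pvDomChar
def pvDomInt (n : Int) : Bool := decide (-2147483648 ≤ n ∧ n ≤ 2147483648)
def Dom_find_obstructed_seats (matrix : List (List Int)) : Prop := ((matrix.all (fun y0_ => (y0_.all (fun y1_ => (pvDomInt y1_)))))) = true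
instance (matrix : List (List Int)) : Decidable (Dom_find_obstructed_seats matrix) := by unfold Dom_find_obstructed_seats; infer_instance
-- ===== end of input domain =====

-- B replaces A's per-seat rescan of the column below with one bottom-up pass computing
-- per-column suffix maxima (a 'below' table); asymptotically faster.

-- ===== PORT A =====
-- the inner 'for row in range(i+1, num_rows): if matrix[row][j] > h: break' loop,
-- run over the rows below i
def pvInnerA (j : Nat) (h : Int) : List (List Int) → Bool
  | [] => true
  | r :: rest => if r.getD j 0 > h then false else pvInnerA j h rest

def find_obstructed_seats (matrix : List (List Int)) : List (Int × Int) :=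
  let num_rows := matrix.length
  let num_cols := (matrix.headD []).length
  (List.range num_rows).foldl (fun acc i =>
    (List.range num_cols).foldl (fun acc j =>
      let current_height := (matrix.getD i []).getD j 0
      let can_see_game := pvInnerA j current_height (matrix.drop (i + 1))
      if !can_see_game then acc ++ [((i : Int), (j : Int))] else acc) acc) []

-- ===== PORT B =====
-- 'smax = [x if x is not None and x >= v else v for x, v in zip(smax, matrix[i])]'
def pvCombine (smax : List (Option Int)) (row : List Int) : List (Option Int) :=
  List.zipWith (fun x v => match x with
    | some x => if x ≥ v then some x else some v
    | none => some v) smax row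

-- the bottom-up loop: (below table for these rows, columnwise max of these rows)
def pvBelow (num_cols : Nat) : List (List Int) → List (List (Option Int)) × List (Option Int)
  | [] => ([], List.replicate num_cols none)
  | r :: rest =>
      let p := pvBelow num_cols rest
      (p.2 :: p.1, pvCombine p.2 r)

def find_obstructed_seats_alt (matrix : List (List Int)) : List (Int × Int) :=
  let num_rows := matrix.length
  let num_cols := (matrix.headD []).length
  let below := (pvBelow num_cols matrix).1
  (List.range num_rows).flatMap (fun i =>
    ((List.range num_cols).filter (fun j =>
      match (below.getD i []).getD j none with
      | some m => decide (m > (matrix.getD i []).getD j 0)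
      | none => false)).map (fun j : Nat => ((i : Int), (j : Int))))

-- ===== PRECONDITION & SPEC =====
-- Pre_ excludes exactly the inputs on which Python A raises IndexError: the empty matrix
-- (matrix[0]) and matrices having a row shorter than row 0 (matrix[row][j]).
def Pre_find_obstructed_seats (matrix : List (List Int)) : Prop :=
  matrix ≠ [] ∧ ∀ row ∈ matrix, (matrix.headD []).length ≤ row.length
instance (matrix : List (List Int)) : Decidable (Pre_find_obstructed_seats matrix) := by
  unfold Pre_find_obstructed_seats; infer_instance
def pvWitness_find_obstructed_seats : List (List Int) := [[1, 2], [3, 4]]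

def Spec_find_obstructed_seats (matrix : List (List Int)) (out : List (Int × Int)) : Prop := out = find_obstructed_seats_alt matrix
instance (matrix : List (List Int)) (out : List (Int × Int)) : Decidable (Spec_find_obstructed_seats matrix out) := by unfold Spec_find_obstructed_seats; infer_instance

-- ===== CLAIM (what is proved, stated in full; the proofs are below) =====
def Claim_equal_find_obstructed_seats : Prop := ∀ (matrix : List (List Int)), Dom_find_obstructed_seats matrix → Pre_find_obstructed_seats matrix → Spec_find_obstructed_seats matrix (find_obstructed_seats matrix)

-- ===== LEMMAS AND PROOFS =====

theorem pvInnerA_false_iff (j : Nat) (h : Int) (rows : List (List Int)) :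
    pvInnerA j h rows = false ↔ ∃ r ∈ rows, r.getD j 0 > h := by
  induction rows with
  | nil => simp [pvInnerA]
  | cons r rest ih =>
      simp only [pvInnerA]
      split_ifs with hr
      · simp_all
      · rw [ih]
        constructor
        · rintro ⟨r', hm, hg⟩; exact ⟨r', List.mem_cons_of_mem _ hm, hg⟩
        · rintro ⟨r', hm, hg⟩
          rcases List.mem_cons.1 hm with h1 | h1
          · subst h1; exact absurd hg hr
          · exact ⟨r', h1, hg⟩

theorem pvBelow_snd_length (nc : Nat) (rows : List (List Int))
    (hlen : ∀ r ∈ rows, nc ≤ r.length) : ((pvBelow nc rows).2).length = nc := by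
  induction rows with
  | nil => simp [pvBelow]
  | cons r rest ih =>
      have hr := hlen r (List.mem_cons_self ..)
      have ih' := ih (fun r' hm => hlen r' (List.mem_cons_of_mem _ hm))
      simp [pvBelow, pvCombine, ih']
      omega

theorem pvBelow_snd_cond (nc j : Nat) (hj : j < nc) (rows : List (List Int))
    (hlen : ∀ r ∈ rows, nc ≤ r.length) (h : Int) :
    (match ((pvBelow nc rows).2).getD j none with
      | some m => decide (m > h)
      | none => false)
    = decide (∃ r ∈ rows, r.getD j 0 > h) := by
  induction rows generalizing h with
  | nil => simp [pvBelow, List.getD, hj]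
  | cons r rest ih =>
      have hr : nc ≤ r.length := hlen r (List.mem_cons_self ..)
      have hlen' : ∀ r' ∈ rest, nc ≤ r'.length :=
        fun r' hm => hlen r' (List.mem_cons_of_mem _ hm)
      have hL : ((pvBelow nc rest).2).length = nc := pvBelow_snd_length nc rest hlen'
      have hjx : j < ((pvBelow nc rest).2).length := by omega
      have hjr : j < r.length := by omega
      have hget : ((pvBelow nc (r :: rest)).2).getD j none
          = (match ((pvBelow nc rest).2)[j] with
              | some x => if x ≥ r[j] then some x else some (r[j])
              | none => some (r[j])) := by
        simp [pvBelow, pvCombine, List.getD, List.getElem?_zipWith,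
          List.getElem?_eq_getElem hjx, List.getElem?_eq_getElem hjr]
      have hrj : r.getD j 0 = r[j] := by
        simp [List.getD, List.getElem?_eq_getElem hjr]
      have hmem : (∃ r' ∈ r :: rest, r'.getD j 0 > h)
          ↔ (r[j] > h ∨ ∃ r' ∈ rest, r'.getD j 0 > h) := by
        constructor
        · rintro ⟨r', hm, hg⟩
          rcases List.mem_cons.1 hm with h1 | h1
          · subst h1; left; rwa [hrj] at hg
          · right; exact ⟨r', h1, hg⟩
        · rintro (hg | ⟨r', hm, hg⟩)
          · exact ⟨r, List.mem_cons_self .., by rwa [hrj]⟩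
          · exact ⟨r', List.mem_cons_of_mem _ hm, hg⟩
      have ihh : ∀ h' : Int,
          (match ((pvBelow nc rest).2)[j] with
            | some m => decide (m > h')
            | none => false)
          = decide (∃ r' ∈ rest, r'.getD j 0 > h') := by
        intro h'
        have := ih hlen' h'
        rwa [List.getD, List.getElem?_eq_getElem hjx] at this
      classical
      have hmemd : decide (∃ r' ∈ r :: rest, r'.getD j 0 > h)
          = decide (r[j] > h ∨ ∃ r' ∈ rest, r'.getD j 0 > h) := decide_eq_decide.2 hmem
      rw [hget, hmemd]
      rcases hx : ((pvBelow nc rest).2)[j] with _ | x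
      · -- rest contributes nothing taller in column j
        have h1 := ihh h
        rw [hx] at h1
        have hno : ¬ ∃ r' ∈ rest, r'.getD j 0 > h := by
          rintro ⟨r', hm, hg⟩
          simp at h1
          have := h1 r' hm
          simp [List.getD] at hg
          omega
        simp only []
        rw [decide_eq_decide]
        constructor
        · exact Or.inl
        · rintro (hc | hc)
          · exact hc
          · exact absurd hc hno
      · have key : ∀ h' : Int, x > h' ↔ (∃ r' ∈ rest, r'.getD j 0 > h') := by
          intro h'
          have h1 := ihh h'
          rw [hx] at h1
          exact decide_eq_decide.1 h1
        by_cases hxy : x ≥ r[j]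
        · simp only [if_pos hxy]
          rw [decide_eq_decide]
          constructor
          · intro hc; exact Or.inr ((key h).1 hc)
          · rintro (hc | hc)
            · omega
            · exact (key h).2 hc
        · simp only [if_neg hxy]
          rw [decide_eq_decide]
          constructor
          · intro hc; exact Or.inl hc
          · rintro (hc | hc)
            · exact hc
            · have := (key h).2 hc; omega

theorem pvBelow_fst_getD (nc : Nat) (rows : List (List Int)) (i : Nat) (hi : i < rows.length) :
    ((pvBelow nc rows).1).getD i [] = (pvBelow nc (rows.drop (i + 1))).2 := by
  induction rows generalizing i with
  | nil => simp at hi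
  | cons r rest ih =>
      cases i with
      | zero => simp [pvBelow, List.getD]
      | succ i =>
          have hi' : i < rest.length := by simpa using hi
          simpa [pvBelow, List.getD] using ih i hi'

theorem pvInnerA_not_eq (j : Nat) (h : Int) (d : List (List Int)) :
    (!pvInnerA j h d) = decide (∃ r ∈ d, r.getD j 0 > h) := by
  by_cases hc : ∃ r ∈ d, r.getD j 0 > h
  · rw [(pvInnerA_false_iff j h d).2 hc]
    simp only [Bool.not_false]
    exact (decide_eq_true hc).symm
  · have ht : pvInnerA j h d = true := by
      rcases hb : pvInnerA j h d
      · exact absurd ((pvInnerA_false_iff j h d).1 hb) hc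
      · rfl
    rw [ht]
    simp only [Bool.not_true]
    exact (decide_eq_false hc).symm

theorem find_obstructed_seats_spec : Claim_equal_find_obstructed_seats := by
  intro matrix _ hpre
  unfold Spec_find_obstructed_seats find_obstructed_seats find_obstructed_seats_alt
  simp only [PySem.List.foldl_append_if, PySem.List.foldl_append_eq_flatMap,
    List.nil_append]
  rw [List.flatMap_def, List.flatMap_def]
  apply congrArg List.flatten
  apply List.map_congr_left
  intro i hi
  rw [List.mem_range] at hi
  apply congrArg
  apply List.filter_congr
  intro j hj
  rw [List.mem_range] at hj
  have hlen_drop : ∀ r ∈ matrix.drop (i + 1), (matrix.headD []).length ≤ r.length :=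
    fun r hm => hpre.2 r (List.mem_of_mem_drop hm)
  rw [pvBelow_fst_getD _ _ _ hi,
    pvBelow_snd_cond _ _ hj _ hlen_drop ((matrix.getD i []).getD j 0),
    pvInnerA_not_eq]
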